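-- pv_equiv track=rewrite | github.com/sunilgitb/DSAlgo-Python | 18_Array/09. Maximum number of chocolates to be distributed equally among k students.py | maxNumOfChocolates
-- ===== SOURCE A (Python) =====
-- def maxNumOfChocolates(arr, k):
--     prefix_sum = 0
--     remainder_index = {}   # remainder -> first index
--     max_sum = 0
--
--     for i in range(len(arr)):
--         prefix_sum += arr[i]
--         rem = prefix_sum % k
--
--         # Case 1: whole prefix divisible by k
--         if rem == 0:
--             max_sum = max(max_sum, prefix_sum)
--
--         # Case 2: first time remainder appears
--         elif rem not in remainder_index:
--             remainder_index[rem] = i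
--
--         # Case 3: remainder seen before
--         else:
--             max_sum = max(
--                 max_sum,
--                 prefix_sum - (sum(arr[:remainder_index[rem] + 1]))
--             )
--
--     return max_sum // k
-- ===== SOURCE B (Python) =====
-- def maxNumOfChocolates(arr, k):
--     # stage 1: list every prefix sum, the empty prefix included
--     prefixes = [0]
--     s = 0
--     for x in arr:
--         s += x
--         prefixes.append(s)
--     # stage 2: group the prefix sums by their remainder mod k, in order
--     groups = {}
--     for p in prefixes:
--         groups.setdefault(p % k, []).append(p)
--     # stage 3: a subarray sum divisible by k is a prefix sum minus an earlier
--     # prefix sum of the same remainder class; the best one pairs each prefix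
--     # with the head of its class (the head itself contributes 0, which is the
--     # empty-subarray baseline)
--     best = max(p - g[0] for g in groups.values() for p in g)
--     return best // k
-- ===== Notes on version B (the rewrite author's own statement) =====
-- stated objective: faster
-- what changed: B replaces A's online scan (running max, first-occurrence index dict, and an O(n) re-summation per hit) by three declarative stages: list all prefix sums, group them by remainder mod k, then take the max of each prefix minus its class head.
import Mathlib
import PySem

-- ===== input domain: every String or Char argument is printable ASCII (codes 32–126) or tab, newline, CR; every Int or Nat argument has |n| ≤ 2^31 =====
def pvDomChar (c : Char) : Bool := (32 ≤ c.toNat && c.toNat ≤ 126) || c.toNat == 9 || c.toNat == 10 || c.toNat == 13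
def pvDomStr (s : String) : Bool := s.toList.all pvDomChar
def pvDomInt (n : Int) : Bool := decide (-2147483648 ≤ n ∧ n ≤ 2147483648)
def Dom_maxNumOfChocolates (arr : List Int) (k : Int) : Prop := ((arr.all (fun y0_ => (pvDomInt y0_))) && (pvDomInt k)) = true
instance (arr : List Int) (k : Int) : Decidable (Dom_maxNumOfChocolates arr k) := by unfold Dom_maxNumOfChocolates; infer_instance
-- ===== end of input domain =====

-- B replaces A's online scan (running max, first-occurrence index dict, O(n) re-summation per
-- hit) by three declarative stages: list all prefix sums, group them by remainder mod k, take
-- the max of each prefix minus its class head.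

-- ===== PORT A =====
-- one loop iteration of A: state = (prefix_sum, remainder_index, max_sum), i = loop index
def stepA (arr : List Int) (k : Int) (st : Int × PySem.Dict Int Int × Int) (i : Int) :
    Int × PySem.Dict Int Int × Int :=
  let prefix_sum := st.1 + PySem.List.pyGetD arr i 0
  let rem := PySem.Int.mod prefix_sum k
  if rem = 0 then
    (prefix_sum, st.2.1, max st.2.2 prefix_sum)
  else
    match st.2.1.get? rem with
    | none => (prefix_sum, st.2.1.insert rem i, st.2.2)          -- first time remainder appears
    | some idx =>                                                 -- remainder seen before
        (prefix_sum, st.2.1,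
          max st.2.2 (prefix_sum - (PySem.List.slice arr none (some (idx + 1))).sum))

def maxNumOfChocolates (arr : List Int) (k : Int) : Int :=
  let fin := (PySem.List.pyRange 0 (PySem.List.len arr) 1).foldl (stepA arr k)
               (0, PySem.Dict.empty, 0)
  PySem.Int.floordiv fin.2.2 k

-- ===== PORT B =====
def maxNumOfChocolates_alt (arr : List Int) (k : Int) : Int :=
  -- stage 1: prefixes = [0]; for x in arr: s += x; prefixes.append(s)
  let st := arr.foldl (fun (st : List Int × Int) x => (st.1 ++ [st.2 + x], st.2 + x)) ([0], 0)
  let prefixes := st.1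
  -- stage 2: for p in prefixes: groups.setdefault(p % k, []).append(p)
  let groups := prefixes.foldl
      (fun (d : PySem.Dict Int (List Int)) p => d.modify (PySem.Int.mod p k) [] (· ++ [p]))
      PySem.Dict.empty
  -- stage 3: max(p - g[0] for g in groups.values() for p in g)  — the generator is never
  -- empty (prefixes always contains 0), so the .getD 0 total form is never the 'none' case
  let cands := groups.values.flatMap (fun g => g.map (fun p => p - PySem.List.pyGetD g 0 0))
  PySem.Int.floordiv ((PySem.List.max? cands (fun y => y)).getD 0) k

-- ===== PRECONDITION & SPEC =====
-- Pre_ excludes exactly k = 0, where Python A raises ZeroDivisionError ('% k' / '// k').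
def Pre_maxNumOfChocolates (arr : List Int) (k : Int) : Prop := k ≠ 0
instance (arr : List Int) (k : Int) : Decidable (Pre_maxNumOfChocolates arr k) := by
  unfold Pre_maxNumOfChocolates; infer_instance

def pvWitness_maxNumOfChocolates : List Int × Int := ([2, 7, 6, 1, 4, 5], 3)

def Spec_maxNumOfChocolates (arr : List Int) (k : Int) (out : Int) : Prop := out = maxNumOfChocolates_alt arr k
instance (arr : List Int) (k : Int) (out : Int) : Decidable (Spec_maxNumOfChocolates arr k out) := by unfold Spec_maxNumOfChocolates; infer_instance

-- ===== CLAIM (what is proved, stated in full; the proofs are below) =====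
def Claim_equal_maxNumOfChocolates : Prop := ∀ (arr : List Int) (k : Int), Dom_maxNumOfChocolates arr k → Pre_maxNumOfChocolates arr k → Spec_maxNumOfChocolates arr k (maxNumOfChocolates arr k)

-- ===== LEMMAS AND PROOFS =====

-- prefix sums of l continuing from running sum s (stage 1's list without its leading 0)
def prefList (s : Int) : List Int → List Int
  | [] => []
  | x :: xs => (s + x) :: prefList (s + x) xs

-- head of the remainder class of r among ALL prefix sums (0 :: prefList 0 arr)
def classFirst (arr : List Int) (k r : Int) : Int :=
  (((0 : Int) :: prefList 0 arr).filter (fun q => PySem.Int.mod q k == r)).headD 0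

-- candidate value contributed by prefix sum p
def cand (arr : List Int) (k p : Int) : Int := p - classFirst arr k (PySem.Int.mod p k)

theorem prefList_append (s : Int) (l₁ l₂ : List Int) :
    prefList s (l₁ ++ l₂) = prefList s l₁ ++ prefList (s + l₁.sum) l₂ := by
  induction l₁ generalizing s with
  | nil => simp [prefList]
  | cons x xs ih => simp [prefList, ih (s + x), add_assoc]

def groupsOf (k : Int) (P : List Int) : PySem.Dict Int (List Int) :=
  P.foldl (fun d p => d.modify (PySem.Int.mod p k) [] (· ++ [p])) PySem.Dict.empty

theorem stage1_eq (l acc : List Int) (s : Int) :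
    l.foldl (fun (st : List Int × Int) x => (st.1 ++ [st.2 + x], st.2 + x)) (acc, s)
      = (acc ++ prefList s l, s + l.sum) := by
  induction l generalizing acc s with
  | nil => simp [prefList]
  | cons x xs ih => simp [prefList, ih, add_assoc]

theorem groupsOf_getD (k : Int) (P : List Int) (c : Int) :
    (groupsOf k P).getD c [] = P.filter (fun p => PySem.Int.mod p k == c) := by
  unfold groupsOf
  rw [← List.foldl_map (f := fun p => (PySem.Int.mod p k, p))
        (g := fun (d : PySem.Dict Int (List Int)) pr => d.modify pr.1 [] (fun x => x ++ [pr.2]))]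
  rw [PySem.Dict.getD_foldl_modify_append]
  rw [List.filter_map]
  simp [Function.comp_def]

theorem groupsOf_keys (k : Int) (P : List Int) :
    (groupsOf k P).keys = PySem.Set.ofList (P.map (fun p => PySem.Int.mod p k)) := by
  unfold groupsOf
  rw [PySem.Dict.keys_foldl_modify_key P (fun p => PySem.Int.mod p k) []
        (fun _ p => (fun x => x ++ [p])) PySem.Dict.empty]
  simp [PySem.Dict.keys_empty, PySem.Set.update_nil_left]

theorem groupsOf_nodup_keys (k : Int) (P : List Int) : (groupsOf k P).keys.Nodup := by
  unfold groupsOf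
  exact PySem.Dict.nodup_keys_foldl_modify_key P (fun p => PySem.Int.mod p k) []
        (fun _ p => (fun x => x ++ [p])) PySem.Dict.empty (by simp [PySem.Dict.keys_empty])

theorem mod_zero_eq (k : Int) : PySem.Int.mod 0 k = 0 := by
  rw [PySem.Int.mod_eq_zero_iff_dvd]; exact dvd_zero k

theorem classFirst_zero (arr : List Int) (k : Int) : classFirst arr k 0 = 0 := by
  simp [classFirst, mod_zero_eq]

-- members of the candidate list of stage 3, characterised
theorem pyGetD_zero_headD (xs : List Int) : PySem.List.pyGetD xs 0 0 = xs.headD 0 := by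
  cases xs <;> simp [PySem.List.pyGetD_zero]

theorem mem_cands_iff (k : Int) (P : List Int) (x : Int) :
    (x ∈ (groupsOf k P).values.flatMap (fun g => g.map (fun p => p - PySem.List.pyGetD g 0 0)))
      ↔ ∃ p ∈ P, x = p - ((P.filter (fun q => PySem.Int.mod q k == PySem.Int.mod p k)).headD 0) := by
  have hnd := groupsOf_nodup_keys k P
  rw [List.mem_flatMap]
  constructor
  · rintro ⟨g, hg, hx⟩
    rw [PySem.Dict.values_eq_map_keys _ hnd [], List.mem_map] at hg
    obtain ⟨c, hc, rfl⟩ := hg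
    rw [groupsOf_getD, List.mem_map] at hx
    obtain ⟨p, hp, rfl⟩ := hx
    have hp' := List.mem_filter.mp hp
    have hmod : PySem.Int.mod p k = c := by simpa using hp'.2
    refine ⟨p, hp'.1, ?_⟩
    rw [pyGetD_zero_headD, hmod]
  · rintro ⟨p, hp, rfl⟩
    refine ⟨(groupsOf k P).getD (PySem.Int.mod p k) [], ?_, ?_⟩
    · rw [PySem.Dict.values_eq_map_keys _ hnd []]
      refine List.mem_map_of_mem ?_
      rw [groupsOf_keys]
      exact (PySem.Set.mem_ofList _ _).mpr (List.mem_map_of_mem hp)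
    · rw [groupsOf_getD, List.mem_map]
      exact ⟨p, List.mem_filter.mpr ⟨hp, by simp⟩,
        by rw [pyGetD_zero_headD]⟩

theorem max?_eq_of_mem_iff (l₁ l₂ : List Int) (hne : l₁ ≠ [])
    (h : ∀ x, x ∈ l₁ ↔ x ∈ l₂) :
    PySem.List.max? l₁ (fun y => y) = PySem.List.max? l₂ (fun y => y) := by
  have hne₂ : l₂ ≠ [] := by
    obtain ⟨x, hx⟩ := List.exists_mem_of_ne_nil l₁ hne
    intro h2
    rw [h2] at h
    exact absurd ((h x).mp hx) (by simp)
  cases h₁ : PySem.List.max? l₁ (fun y => y) with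
  | none => exact absurd ((PySem.List.max?_eq_none_iff _ _).mp h₁) hne
  | some m₁ =>
    cases h₂ : PySem.List.max? l₂ (fun y => y) with
    | none => exact absurd ((PySem.List.max?_eq_none_iff _ _).mp h₂) hne₂
    | some m₂ =>
      have le₁ : m₁ ≤ m₂ := PySem.List.max?_isMax h₂ m₁ ((h m₁).mp (PySem.List.max?_mem h₁))
      have le₂ : m₂ ≤ m₁ := PySem.List.max?_isMax h₁ m₂ ((h m₂).mpr (PySem.List.max?_mem h₂))
      rw [le_antisymm le₁ le₂]

-- what PORT B computes, in closed form
theorem alt_eq (arr : List Int) (k : Int) :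
    maxNumOfChocolates_alt arr k
      = PySem.Int.floordiv (((prefList 0 arr).map (cand arr k)).foldl max 0) k := by
  unfold maxNumOfChocolates_alt
  simp only [stage1_eq]
  have hfold : (([0] ++ prefList 0 arr, 0 + List.sum arr).1).foldl
      (fun (d : PySem.Dict Int (List Int)) p => d.modify (PySem.Int.mod p k) [] (· ++ [p]))
      PySem.Dict.empty = groupsOf k ((0 : Int) :: prefList 0 arr) := by
    simp [groupsOf]
  rw [hfold]
  have hmem : ∀ x,
      x ∈ (groupsOf k ((0 : Int) :: prefList 0 arr)).values.flatMap
            (fun g => g.map (fun p => p - PySem.List.pyGetD g 0 0))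
        ↔ x ∈ (((0 : Int) :: prefList 0 arr).map (cand arr k)) := by
    intro x
    rw [mem_cands_iff, List.mem_map]
    constructor
    · rintro ⟨p, hp, rfl⟩; exact ⟨p, hp, rfl⟩
    · rintro ⟨p, hp, rfl⟩; exact ⟨p, hp, rfl⟩
  rw [max?_eq_of_mem_iff _ _ ?hne hmem]
  case hne =>
    intro hnil
    have : ∀ x, x ∈ (((0 : Int) :: prefList 0 arr).map (cand arr k)) → False := by
      intro x hx
      exact absurd (((hmem x).mpr hx)) (by rw [hnil]; simp)
    exact this _ (List.mem_map_of_mem (List.mem_cons_self))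
  have hc0 : cand arr k 0 = 0 := by
    simp [cand, mod_zero_eq, classFirst_zero]
  rw [List.map_cons, PySem.List.max?_id_cons, hc0, Option.getD_some]

-- the A-side loop invariant
theorem A_loop (arr : List Int) (k : Int) :
    ∀ (suf pre : List Int) (dA : PySem.Dict Int Int) (m : Int),
      arr = pre ++ suf →
      (∀ r, dA.get? r = none → r ≠ 0 → ∀ p ∈ prefList 0 pre, PySem.Int.mod p k ≠ r) →
      (∀ r idx, dA.get? r = some idx →
        r ≠ 0 ∧ (PySem.List.slice arr none (some (idx + 1))).sum = classFirst arr k r) →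
      0 ≤ m →
      ((PySem.List.pyRange (pre.length : Int) (arr.length : Int) 1).foldl (stepA arr k)
          (pre.sum, dA, m)).2.2
        = ((prefList pre.sum suf).map (cand arr k)).foldl max m := by
  intro suf
  induction suf with
  | nil =>
    intro pre dA m harr _ _ _
    subst harr
    rw [PySem.List.pyRange_one_eq_nil (by simp)]
    simp [prefList]
  | cons x suf' ih =>
    intro pre dA m harr hnone hsome hm
    have hlt : (pre.length : Int) < (arr.length : Int) := by subst harr; simp
    rw [PySem.List.pyRange_one_cons hlt, List.foldl_cons]
    have hget : PySem.List.pyGetD arr (pre.length : Int) 0 = x := by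
      subst harr
      simp [PySem.List.pyGetD_natCast, List.getD]
    have hPsplit : prefList 0 arr
        = prefList 0 pre ++ (pre.sum + x) :: prefList (pre.sum + x) suf' := by
      rw [harr, prefList_append]; simp [prefList]
    have htake : (PySem.List.slice arr none (some ((pre.length : Int) + 1))).sum
        = pre.sum + x := by
      have hc : ((pre.length : Int) + 1) = ((pre.length + 1 : Nat) : Int) := by push_cast; ring
      rw [hc, PySem.List.slice_to_natCast, harr]
      rw [List.take_append, List.take_of_length_le (by omega)]
      simp
    have hrec : ∀ (dA' : PySem.Dict Int Int) (m' : Int),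
        (∀ r, dA'.get? r = none → r ≠ 0 →
          ∀ p ∈ prefList 0 (pre ++ [x]), PySem.Int.mod p k ≠ r) →
        (∀ r idx, dA'.get? r = some idx →
          r ≠ 0 ∧ (PySem.List.slice arr none (some (idx + 1))).sum = classFirst arr k r) →
        0 ≤ m' →
        ((PySem.List.pyRange ((pre.length : Int) + 1) (arr.length : Int) 1).foldl (stepA arr k)
            (pre.sum + x, dA', m')).2.2
          = ((prefList (pre.sum + x) suf').map (cand arr k)).foldl max m' := by
      intro dA' m' h1 h2 h3
      have h := ih (pre ++ [x]) dA' m' (by simp [harr]) h1 h2 h3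
      simpa [add_comm] using h
    have hmem_pre : ∀ p' ∈ prefList 0 (pre ++ [x]),
        p' ∈ prefList 0 pre ∨ p' = pre.sum + x := by
      intro p' hp'
      rw [prefList_append] at hp'
      simp [prefList] at hp'
      tauto
    by_cases h0 : PySem.Int.mod (pre.sum + x) k = 0
    · -- remainder 0: A takes max with the whole prefix; cand = the prefix itself
      have estep : stepA arr k (pre.sum, dA, m) (pre.length : Int)
          = (pre.sum + x, dA, max m (pre.sum + x)) := by
        simp [stepA, hget, h0]
      rw [estep]
      have hcand : cand arr k (pre.sum + x) = pre.sum + x := by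
        simp [cand, h0, classFirst_zero]
      rw [hrec dA (max m (pre.sum + x))
            (by intro r hr hr0 p' hp'
                rcases hmem_pre p' hp' with h1 | h1
                · exact hnone r hr hr0 p' h1
                · rw [h1, h0]; exact Ne.symm hr0)
            hsome (le_trans hm (le_max_left _ _))]
      simp [prefList, hcand]
    · cases hA : dA.get? (PySem.Int.mod (pre.sum + x) k) with
      | none =>
        -- first time this remainder appears: cand = 0, A stores the index
        have estep : stepA arr k (pre.sum, dA, m) (pre.length : Int)
            = (pre.sum + x,
               dA.insert (PySem.Int.mod (pre.sum + x) k) (pre.length : Int), m) := by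
          simp [stepA, hget, h0, hA]
        rw [estep]
        have hfirst : classFirst arr k (PySem.Int.mod (pre.sum + x) k) = pre.sum + x := by
          unfold classFirst
          rw [hPsplit]
          rw [List.filter_cons, List.filter_append, List.filter_cons]
          have hz : (PySem.Int.mod 0 k == PySem.Int.mod (pre.sum + x) k) = false := by
            simp [mod_zero_eq]; exact fun hc => h0 hc.symm
          have hnil : (prefList 0 pre).filter
              (fun q => PySem.Int.mod q k == PySem.Int.mod (pre.sum + x) k) = [] := by
            rw [List.filter_eq_nil_iff]
            intro q hq
            simpa using hnone _ hA h0 q hq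
          simp [hz, hnil]
        have hcand : cand arr k (pre.sum + x) = 0 := by
          simp [cand, hfirst]
        rw [hrec (dA.insert (PySem.Int.mod (pre.sum + x) k) (pre.length : Int)) m
              (by intro r hr hr0 p' hp'
                  rw [PySem.Dict.get?_insert] at hr
                  by_cases hrr : r = PySem.Int.mod (pre.sum + x) k
                  · rw [if_pos hrr] at hr; exact absurd hr (by simp)
                  · rw [if_neg hrr] at hr
                    rcases hmem_pre p' hp' with h1 | h1
                    · exact hnone r hr hr0 p' h1
                    · rw [h1]; exact fun hc => hrr hc.symm)
              (by intro r idx hr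
                  rw [PySem.Dict.get?_insert] at hr
                  by_cases hrr : r = PySem.Int.mod (pre.sum + x) k
                  · rw [if_pos hrr] at hr
                    injection hr with hidx
                    subst hrr
                    subst hidx
                    exact ⟨h0, by rw [htake, hfirst]⟩
                  · rw [if_neg hrr] at hr
                    exact hsome r idx hr)
              hm]
        simp [prefList, hcand, max_eq_left hm]
      | some idx =>
        -- remainder seen before: A re-sums arr[:idx+1], which IS the class head
        have estep : stepA arr k (pre.sum, dA, m) (pre.length : Int)
            = (pre.sum + x, dA,
               max m (pre.sum + x - (PySem.List.slice arr none (some (idx + 1))).sum)) := by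
          simp [stepA, hget, h0, hA]
        rw [estep]
        have hsl := hsome _ idx hA
        have hcand : pre.sum + x - (PySem.List.slice arr none (some (idx + 1))).sum
            = cand arr k (pre.sum + x) := by
          rw [hsl.2]; rfl
        rw [hrec dA (max m (pre.sum + x - (PySem.List.slice arr none (some (idx + 1))).sum))
              (by intro r hr hr0 p' hp'
                  rcases hmem_pre p' hp' with h1 | h1
                  · exact hnone r hr hr0 p' h1
                  · rw [h1]
                    intro hc
                    rw [hc] at hA
                    rw [hA] at hr
                    exact absurd hr (by simp))
              hsome (le_trans hm (le_max_left _ _))]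
        simp [prefList, hcand]

-- ===== VERDICT (by name: the statement is the Claim_ definition above) =====
theorem maxNumOfChocolates_spec : Claim_equal_maxNumOfChocolates := by
  intro arr k _ hk
  unfold Spec_maxNumOfChocolates maxNumOfChocolates
  have hA := A_loop arr k arr [] PySem.Dict.empty 0 (by simp)
      (by intro r hr h0 p hp; simp [prefList] at hp)
      (by intro r idx h; simp [PySem.Dict.get?_empty] at h) le_rfl
  simp only [List.length_nil, Nat.cast_zero, List.sum_nil] at hA
  rw [alt_eq]
  simp only [PySem.List.len_eq]
  rw [hA]
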